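-- pv_equiv track=rewrite | github.com/anujpathania/HotSniper | tools/viz_hb_interactive.py | get_interval_diffs
-- ===== SOURCE A (Python) =====
-- def get_interval_diffs(data):
--     if not isinstance(data, list):
--         raise TypeError("data must be a list of integers")
--
--     diffs = []
--     prev_element = None
--
--     for cur_element in data:
--         if not isinstance(cur_element, int):
--             raise TypeError("found cur_element of list that is not of integer type")
--
--         if prev_element is None:
--             prev_element = cur_element
--             continue
--
--         diffs.append(cur_element - prev_element)
--         prev_element = cur_element
--
--     return diffs
-- ===== SOURCE B (Python) =====
-- def get_interval_diffs(data):
--     if not isinstance(data, list):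
--         raise TypeError("data must be a list of integers")
--
--     stack = []
--     for cur_element in data:
--         if not isinstance(cur_element, int):
--             raise TypeError("found cur_element of list that is not of integer type")
--         stack.append(cur_element)
--
--     out = []
--     while len(stack) >= 2:
--         last = stack.pop()
--         out.append(last - stack[-1])
--     out.reverse()
--     return out
-- ===== Notes on version B (the rewrite author's own statement) =====
-- stated objective: alternative
-- what changed: Replaces A's forward single pass with a prev-element sentinel by a stack-based back-to-front construction: copy the (validated) list onto a stack, repeatedly pop the top and subtract the new top to emit the differences in reverse order, then reverse the result.
import Mathlib
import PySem

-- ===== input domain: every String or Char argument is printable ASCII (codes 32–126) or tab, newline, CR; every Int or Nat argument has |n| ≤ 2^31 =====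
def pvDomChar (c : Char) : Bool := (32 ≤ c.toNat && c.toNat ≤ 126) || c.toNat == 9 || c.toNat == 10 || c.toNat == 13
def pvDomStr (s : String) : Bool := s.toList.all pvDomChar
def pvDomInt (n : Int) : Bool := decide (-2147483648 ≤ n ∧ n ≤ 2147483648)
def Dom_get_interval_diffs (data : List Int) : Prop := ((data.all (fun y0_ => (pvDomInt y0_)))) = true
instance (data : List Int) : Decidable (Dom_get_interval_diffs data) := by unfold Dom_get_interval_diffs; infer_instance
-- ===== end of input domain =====

-- B replaces A's forward sentinel-driven pass by a stack popped back-to-front (emit reversed diffs, then reverse);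
-- alternative decomposition, same cost. The Python isinstance guards are vacuous under the Lean type List Int.
-- B mutates only its own local stack copy, never the argument.

-- ===== PORT A =====
-- A's loop: state (diffs, prev_element : Option Int); first element only sets prev.
def get_interval_diffs_loop (st : List Int × Option Int) (cur : Int) : List Int × Option Int :=
  match st.2 with
  | none => (st.1, some cur)
  | some prev => (st.1 ++ [cur - prev], some cur)

def get_interval_diffs (data : List Int) : List Int :=
  (data.foldl get_interval_diffs_loop ([], none)).1

-- ===== PORT B =====
-- while len(stack) >= 2: last = stack.pop(); out.append(last - stack[-1])
-- (stack.getLast / dropLast are Python's stack[-1] / pop() — exact, the nonemptiness proofs hold because len >= 2)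
def get_interval_diffs_alt_loop (stack out : List Int) : List Int :=
  if h : 2 ≤ stack.length then
    let last := stack.getLast (by intro hn; rw [hn] at h; simp at h)
    let stack' := stack.dropLast
    get_interval_diffs_alt_loop stack'
      (out ++ [last - stack'.getLast (by
        intro hn
        have h1 : stack.dropLast = ([] : List Int) := hn
        have h2 := congrArg List.length h1
        rw [List.length_dropLast] at h2
        simp at h2
        omega)])
  else out
termination_by stack.length
decreasing_by simp [List.length_dropLast]; omega

def get_interval_diffs_alt (data : List Int) : List Int :=
  (get_interval_diffs_alt_loop data []).reverse

-- ===== PRECONDITION & SPEC =====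
def Spec_get_interval_diffs (data : List Int) (out : List Int) : Prop := out = get_interval_diffs_alt data
instance (data : List Int) (out : List Int) : Decidable (Spec_get_interval_diffs data out) := by unfold Spec_get_interval_diffs; infer_instance

-- ===== CLAIM (what is proved, stated in full; the proofs are below) =====
def Claim_equal_get_interval_diffs : Prop := ∀ (data : List Int), Dom_get_interval_diffs data → Spec_get_interval_diffs data (get_interval_diffs data)

-- ===== LEMMAS AND PROOFS =====

-- the common reference value: pairwise differences
def gid_ref (data : List Int) : List Int :=
  List.zipWith (fun a b => b - a) data data.tail

-- A's loop invariant: folding from state (acc, some p) over l appends the pairwise diffs of (p :: l)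
theorem gid_loop_inv (l : List Int) (acc : List Int) (p : Int) :
    (l.foldl get_interval_diffs_loop (acc, some p)).1
      = acc ++ List.zipWith (fun a b => b - a) (p :: l) l := by
  induction l generalizing acc p with
  | nil => simp
  | cons x xs ih =>
      simp [List.foldl, get_interval_diffs_loop, ih, List.append_assoc]

theorem gid_a_eq_ref (data : List Int) : get_interval_diffs data = gid_ref data := by
  cases data with
  | nil => simp [get_interval_diffs, gid_ref]
  | cons x xs =>
      simp [get_interval_diffs, gid_ref, List.foldl, get_interval_diffs_loop, gid_loop_inv]

-- pairwise diffs of a snoc: the last diff splits off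
theorem gid_ref_concat (ys : List Int) (y : Int) (h : ys ≠ []) :
    gid_ref (ys ++ [y]) = gid_ref ys ++ [y - ys.getLast h] := by
  induction ys with
  | nil => exact absurd rfl h
  | cons z zs ih =>
      cases zs with
      | nil => simp [gid_ref]
      | cons w ws =>
          have := ih (by simp)
          simp [gid_ref] at this ⊢
          simp [this]

-- B's loop produces the diffs in reverse order, appended to out
theorem gid_alt_loop_eq (stack : List Int) : ∀ out,
    get_interval_diffs_alt_loop stack out = out ++ (gid_ref stack).reverse := by
  induction stack using List.reverseRecOn with
  | nil => intro out; rw [get_interval_diffs_alt_loop]; simp [gid_ref]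
  | append_singleton ys y ih =>
      intro out
      cases hys : ys with
      | nil =>
          rw [get_interval_diffs_alt_loop]
          simp [gid_ref]
      | cons z zs =>
          subst hys
          rw [get_interval_diffs_alt_loop]
          rw [dif_pos (show 2 ≤ (z :: zs ++ [y]).length by simp)]
          simp only [List.dropLast_concat, List.getLast_concat]
          rw [ih, gid_ref_concat (z :: zs) y (by simp)]
          simp

theorem gid_b_eq_ref (data : List Int) : get_interval_diffs_alt data = gid_ref data := by
  rw [get_interval_diffs_alt, gid_alt_loop_eq]
  simp

-- ===== VERDICT (by name: the statement is the Claim_ definition above) =====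
theorem get_interval_diffs_spec : Claim_equal_get_interval_diffs := by
  intro data _
  unfold Spec_get_interval_diffs
  rw [gid_a_eq_ref, gid_b_eq_ref]
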